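-- pv_equiv track=rewrite | github.com/andrewdunn358-dev/Veteran | backend/safety/safety_monitor.py | is_negated
-- ===== SOURCE A (Python) =====
-- NEGATION_PREFIXES = [
--     "don't want to", "do not want to",
--     "never", "not going to", "won't",
--     "wouldn't", "didn't", "doesn't",
--     "used to", "used to want to",
--     "thought about", "used to think about",
--     "afraid of", "scared of", "fear",
--     "wouldn't want to", "would never",
--     "joking", "just joking", "only joking",
--     "not", "no longer", "not anymore",
-- ]
--
-- NEGATION_WINDOW = 8  # Words to look back for negation context
--
-- def is_negated(text: str, match_start: int) -> bool:
--     """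
--     Check if a match is preceded by a negation phrase within a word window.
--     """
--     # Get the text before the match, up to NEGATION_WINDOW words back
--     preceding = text[:match_start]
--     preceding_words = preceding.split()
--     window = " ".join(preceding_words[-NEGATION_WINDOW:])
--
--     for negation in NEGATION_PREFIXES:
--         if negation in window:
--             return True
--     return False
-- ===== SOURCE B (Python) =====
-- NEGATION_PREFIXES = [
--     "don't want to", "do not want to",
--     "never", "not going to", "won't",
--     "wouldn't", "didn't", "doesn't",
--     "used to", "used to want to",
--     "thought about", "used to think about",
--     "afraid of", "scared of", "fear",
--     "wouldn't want to", "would never",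
--     "joking", "just joking", "only joking",
--     "not", "no longer", "not anymore",
-- ]
--
-- NEGATION_WINDOW = 8  # Words to look back for negation context
--
--
-- def is_negated(text: str, match_start: int) -> bool:
--     """
--     Check if a match is preceded by a negation phrase within a word window.
--
--     Multi-pattern NFA simulation: one forward pass over the window threading a
--     set of active partial matches (pattern remainders); at each character every
--     phrase may also start fresh, and a match is reported the moment some
--     remainder is fully consumed.  No substring-search primitive is used.
--     """
--     preceding_words = text[:match_start].split()
--     window = " ".join(preceding_words[-NEGATION_WINDOW:])
--     active = []  # remainders of phrases currently being matched
--     for c in window: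
--         active = [r[1:] for r in active + NEGATION_PREFIXES if r and r[0] == c]
--         if "" in active:
--             return True
--     return False
-- ===== Notes on version B (the rewrite author's own statement) =====
-- stated objective: alternative
-- what changed: Replaces A's phrase-major loop of full substring searches ('negation in window' once per phrase) by a single forward pass over the window that simulates a multi-pattern NFA: a set of active pattern remainders is threaded through the scan, every phrase may start fresh at each character, and a hit is reported when a remainder is fully consumed.
import Mathlib
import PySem

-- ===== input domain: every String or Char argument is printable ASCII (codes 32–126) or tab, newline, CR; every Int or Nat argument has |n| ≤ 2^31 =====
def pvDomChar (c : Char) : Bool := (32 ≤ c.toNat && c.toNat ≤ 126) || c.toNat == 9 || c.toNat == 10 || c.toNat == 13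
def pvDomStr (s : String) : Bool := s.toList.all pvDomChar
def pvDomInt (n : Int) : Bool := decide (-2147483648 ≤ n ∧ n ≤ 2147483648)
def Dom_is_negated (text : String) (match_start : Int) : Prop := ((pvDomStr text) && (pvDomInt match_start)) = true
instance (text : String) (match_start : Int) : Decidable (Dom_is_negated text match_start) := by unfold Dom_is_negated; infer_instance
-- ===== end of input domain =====

-- B replaces A's phrase-major loop of substring searches by a single forward pass
-- simulating a multi-pattern NFA over active pattern remainders
-- (objective: alternative; same result, no speed claim).

def pvNegPrefixes : List String := [
  "don't want to", "do not want to",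
  "never", "not going to", "won't",
  "wouldn't", "didn't", "doesn't",
  "used to", "used to want to",
  "thought about", "used to think about",
  "afraid of", "scared of", "fear",
  "wouldn't want to", "would never",
  "joking", "just joking", "only joking",
  "not", "no longer", "not anymore"]

-- ===== PORT A =====
-- 'for negation in NEGATION_PREFIXES: if negation in window: return True / return False'
def pvLoopA (ps : List String) (w : List Char) : Bool :=
  match ps with
  | [] => false
  | p :: rest => if PySem.Chars.isIn p.toList w then true else pvLoopA rest w

def is_negated (text : String) (match_start : Int) : Bool :=
  let preceding := PySem.Str.slice text none (some match_start)
  let preceding_words := PySem.Str.split₀ preceding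
  let window := PySem.Str.join " " (PySem.List.slice preceding_words (some (-8)) none)
  pvLoopA pvNegPrefixes window.toList

-- ===== PORT B =====
-- 'active = [r[1:] for r in active + NEGATION_PREFIXES if r and r[0] == c]'
def pvStepB (c : Char) (act : List (List Char)) : List (List Char) :=
  (act ++ pvNegPrefixes.map String.toList).filterMap
    (fun r => match r with
      | [] => none
      | d :: rest => if d = c then some rest else none)

-- 'for c in window: active = …; if "" in active: return True / return False'
def pvRunB (act : List (List Char)) (w : List Char) : Bool :=
  match w with
  | [] => false
  | c :: rest =>
      if (pvStepB c act).contains [] then true else pvRunB (pvStepB c act) rest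

def is_negated_alt (text : String) (match_start : Int) : Bool :=
  let preceding_words := PySem.Str.split₀ (PySem.Str.slice text none (some match_start))
  let window := PySem.Str.join " " (PySem.List.slice preceding_words (some (-8)) none)
  pvRunB [] window.toList

-- ===== PRECONDITION & SPEC =====
def Spec_is_negated (text : String) (match_start : Int) (out : Bool) : Prop := out = is_negated_alt text match_start
instance (text : String) (match_start : Int) (out : Bool) : Decidable (Spec_is_negated text match_start out) := by unfold Spec_is_negated; infer_instance

-- ===== CLAIM =====
def Claim_equal_is_negated : Prop := ∀ (text : String) (match_start : Int), Dom_is_negated text match_start → Spec_is_negated text match_start (is_negated text match_start)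

-- ===== LEMMAS AND PROOFS =====

theorem pvLoopA_eq_true (ps : List String) (w : List Char) :
    pvLoopA ps w = true ↔ ∃ p ∈ ps, p.toList <:+: w := by
  induction ps with
  | nil => simp [pvLoopA]
  | cons p rest ih =>
      simp [pvLoopA, PySem.Chars.isIn_iff_infix, ih]

theorem mem_pvStepB (c : Char) (act : List (List Char)) (r : List Char) :
    r ∈ pvStepB c act ↔ (c :: r) ∈ act ++ pvNegPrefixes.map String.toList := by
  simp only [pvStepB, List.mem_filterMap]
  constructor
  · rintro ⟨q, hq, hf⟩
    cases q with
    | nil => simp at hf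
    | cons d rest =>
        simp only at hf
        split at hf
        · next hd => cases Option.some.inj hf; subst hd; exact hq
        · cases hf
  · intro h
    exact ⟨c :: r, h, by simp⟩

theorem nil_mem_pvStepB_cases (c : Char) (act : List (List Char))
    (h : ([] : List Char) ∈ pvStepB c act) :
    [c] ∈ act ∨ ∃ p ∈ pvNegPrefixes, p.toList = [c] := by
  rw [mem_pvStepB] at h
  rcases List.mem_append.mp h with h | h
  · exact Or.inl h
  · obtain ⟨p, hp, hpc⟩ := List.mem_map.mp h
    exact Or.inr ⟨p, hp, hpc⟩

theorem pvRunB_eq_true (w : List Char) : ∀ (act : List (List Char)),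
    (pvRunB act w = true ↔
      (∃ r ∈ act, r ≠ [] ∧ r <+: w) ∨
      (∃ p ∈ pvNegPrefixes, p.toList ≠ [] ∧ p.toList <:+: w)) := by
  induction w with
  | nil =>
      intro act
      simp only [pvRunB, Bool.false_eq_true, false_iff]
      rintro (⟨r, _, hne, hpre⟩ | ⟨p, _, hne, hinf⟩)
      · exact hne (List.prefix_nil.mp hpre)
      · exact hne (List.infix_nil.mp hinf)
  | cons c rest ih =>
      intro act
      show (if (pvStepB c act).contains [] then true else pvRunB (pvStepB c act) rest) = true ↔ _
      by_cases hnil : ([] : List Char) ∈ pvStepB c act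
      · rw [if_pos (by simpa using hnil)]
        simp only [true_iff]
        rcases nil_mem_pvStepB_cases c act hnil with h | ⟨p, hp, hpc⟩
        · exact Or.inl ⟨[c], h, by simp, by simp⟩
        · exact Or.inr ⟨p, hp, by simp [hpc],
            hpc ▸ List.infix_cons_iff.mpr (Or.inl (by simp))⟩
      · rw [if_neg (by simpa using hnil)]
        rw [ih]
        constructor
        · rintro (⟨r, hr, hne, hpre⟩ | ⟨p, hp, hne, hinf⟩)
          · rw [mem_pvStepB] at hr
            rcases List.mem_append.mp hr with h | h
            · exact Or.inl ⟨c :: r, h, by simp, by simp [hpre]⟩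
            · obtain ⟨p, hp, hpc⟩ := List.mem_map.mp h
              exact Or.inr ⟨p, hp, by simp [hpc],
                hpc ▸ List.infix_cons_iff.mpr (Or.inl (by simp [hpre]))⟩
          · exact Or.inr ⟨p, hp, hne, hinf.trans (List.suffix_cons c rest).isInfix⟩
        · rintro (⟨r, hr, hne, hpre⟩ | ⟨p, hp, hne, hinf⟩)
          · obtain ⟨d, r', rfl⟩ : ∃ d r', r = d :: r' := by
              cases r with
              | nil => exact absurd rfl hne
              | cons d r' => exact ⟨d, r', rfl⟩
            obtain ⟨hd, hpre'⟩ := by simpa using hpre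
            rw [hd] at hr
            have hmem : r' ∈ pvStepB c act := by
              rw [mem_pvStepB]; exact List.mem_append.mpr (Or.inl hr)
            by_cases hr' : r' = []
            · exact absurd (hr' ▸ hmem) hnil
            · exact Or.inl ⟨r', hmem, hr', hpre'⟩
          · rcases List.infix_cons_iff.mp hinf with hpre | hinf'
            · obtain ⟨d, r', hq⟩ : ∃ d r', p.toList = d :: r' := by
                cases hpl : p.toList with
                | nil => exact absurd hpl hne
                | cons d r' => exact ⟨d, r', rfl⟩
              rw [hq] at hpre
              obtain ⟨hd, hpre'⟩ := by simpa using hpre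
              rw [hd] at hq
              have hmem : r' ∈ pvStepB c act := by
                rw [mem_pvStepB]
                exact List.mem_append.mpr (Or.inr (List.mem_map.mpr ⟨p, hp, hq⟩))
              by_cases hr' : r' = []
              · exact absurd (hr' ▸ hmem) hnil
              · exact Or.inl ⟨r', hmem, hr', hpre'⟩
            · exact Or.inr ⟨p, hp, hne, hinf'⟩

theorem pvNegPrefixes_nonempty : ∀ p ∈ pvNegPrefixes, p.toList ≠ [] := by decide

theorem pvLoopA_eq_pvRunB (w : List Char) : pvLoopA pvNegPrefixes w = pvRunB [] w := by
  rw [Bool.eq_iff_iff, pvLoopA_eq_true, pvRunB_eq_true]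
  constructor
  · rintro ⟨p, hp, hinf⟩
    exact Or.inr ⟨p, hp, pvNegPrefixes_nonempty p hp, hinf⟩
  · rintro (⟨r, hr, -, -⟩ | ⟨p, hp, -, hinf⟩)
    · simp at hr
    · exact ⟨p, hp, hinf⟩

-- ===== VERDICT =====
theorem is_negated_spec : Claim_equal_is_negated := by
  intro text match_start _
  unfold Spec_is_negated is_negated is_negated_alt
  exact pvLoopA_eq_pvRunB _
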